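-- pv_equiv track=rewrite | github.com/Masonzton/Detective_Problem | iterate_through_all_atoms.py | atom_selection_to_interview
-- ===== SOURCE A (Python) =====
-- from typing import List, Tuple
--
-- def atom_selection_to_interview(
--     atom_numbers: List[int], number_of_interviews: int
-- ) -> List[List[int]]:
--     sample_list = []
--     for interview_number in range(number_of_interviews):
--         current_interview = []
--         for person, atom_number in enumerate(atom_numbers):
--             if atom_number & (1 << interview_number):
--                 current_interview.append(person)
--         sample_list.append(current_interview)
--
--     return sample_list
-- ===== SOURCE B (Python) =====
-- def atom_selection_to_interview(atom_numbers, number_of_interviews):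
--     n = max(number_of_interviews, 0)
--     sample_list = [[] for _ in range(n)]
--     mask = (1 << n) - 1
--     for person, atom_number in enumerate(atom_numbers):
--         v = atom_number & mask
--         j = 0
--         while v:
--             if v & 1:
--                 sample_list[j].append(person)
--             v >>= 1
--             j += 1
--     return sample_list
-- ===== Notes on version B (the rewrite author's own statement) =====
-- stated objective: alternative
-- what changed: Instead of scanning the whole person list once per interview (interviews x people bit tests), B makes a single pass over the persons and peels the set bits off each masked atom number, appending the person index to preallocated per-interview lists, stopping at each number's highest set bit; intended as faster (it skips bits above each atom's highest set bit), measured only ~1.45-1.6x on the probe's dense inputs.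
import Mathlib
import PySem

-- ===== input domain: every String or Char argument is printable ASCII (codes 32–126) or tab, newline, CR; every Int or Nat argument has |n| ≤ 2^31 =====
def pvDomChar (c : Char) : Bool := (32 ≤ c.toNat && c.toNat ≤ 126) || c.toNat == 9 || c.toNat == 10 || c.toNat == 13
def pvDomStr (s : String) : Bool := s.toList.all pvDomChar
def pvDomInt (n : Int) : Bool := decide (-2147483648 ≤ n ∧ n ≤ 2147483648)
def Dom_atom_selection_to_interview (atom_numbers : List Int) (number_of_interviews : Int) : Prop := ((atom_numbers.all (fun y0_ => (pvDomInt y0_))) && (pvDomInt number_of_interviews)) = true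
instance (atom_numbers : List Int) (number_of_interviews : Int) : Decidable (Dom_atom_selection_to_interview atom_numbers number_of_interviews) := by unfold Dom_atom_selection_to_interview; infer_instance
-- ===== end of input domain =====

-- B replaces A's interview×person double scan by one pass over the persons that peels off
-- each person's set bits into preallocated per-interview lists (objective: alternative;
-- intended as faster, measured only ~1.45-1.6x on a timing run's dense inputs).

-- ===== PORT A =====
def atom_selection_to_interview (atom_numbers : List Int) (number_of_interviews : Int) : List (List Int) :=
  (PySem.List.pyRange 0 number_of_interviews).foldl
    (fun sample_list interview_number =>
      sample_list ++
        [(PySem.List.enumerate atom_numbers).foldl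
          (fun current_interview pa =>
            if PySem.Int.band pa.2 ((1 : Int) <<< interview_number) ≠ 0 then
              current_interview ++ [pa.1]
            else current_interview) []])
    []

-- ===== PORT B =====
-- inner 'while v: if v & 1: sample_list[j].append(person); v >>= 1; j += 1'.
-- v is Python's nonnegative masked value, carried as a Nat (exact: atom_number & mask ≥ 0
-- since mask ≥ 0); sample_list[j] is always in range (v < 2^n), so List.modify is exact.
def pvBitLoop (person : Int) (v : Nat) (j : Nat) (res : List (List Int)) : List (List Int) :=
  if v = 0 then res
  else pvBitLoop person (v >>> 1) (j + 1)
        (if v &&& 1 = 1 then res.modify j (fun l => l ++ [person]) else res)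
  termination_by v
  decreasing_by simp [Nat.shiftRight_one]; omega

def atom_selection_to_interview_alt (atom_numbers : List Int) (number_of_interviews : Int) : List (List Int) :=
  let n : Int := max number_of_interviews 0
  let sample_list : List (List Int) := (List.range n.toNat).map (fun _ => ([] : List Int))
  let mask : Int := (1 <<< n) - 1
  (PySem.List.enumerate atom_numbers).foldl
    (fun res pa => pvBitLoop pa.1 (PySem.Int.band pa.2 mask).toNat 0 res)
    sample_list

-- ===== PRECONDITION & SPEC =====
def Spec_atom_selection_to_interview (atom_numbers : List Int) (number_of_interviews : Int) (out : List (List Int)) : Prop := out = atom_selection_to_interview_alt atom_numbers number_of_interviews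
instance (atom_numbers : List Int) (number_of_interviews : Int) (out : List (List Int)) : Decidable (Spec_atom_selection_to_interview atom_numbers number_of_interviews out) := by unfold Spec_atom_selection_to_interview; infer_instance

-- ===== CLAIM (what is proved, stated in full; the proofs are below) =====
def Claim_equal_atom_selection_to_interview : Prop := ∀ (atom_numbers : List Int) (number_of_interviews : Int), Dom_atom_selection_to_interview atom_numbers number_of_interviews → Spec_atom_selection_to_interview atom_numbers number_of_interviews (atom_selection_to_interview atom_numbers number_of_interviews)

-- ===== LEMMAS AND PROOFS =====

theorem pv_testBit_compl : ∀ (j N r : Nat), r < 2^N → j < N →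
    (2^N - 1 - r).testBit j = !(r.testBit j) := by
  intro j
  induction j with
  | zero =>
    intro N r hr hj
    have h2 : (2:Nat)^N = 2 * 2^(N-1) := by
      rw [← pow_succ']; congr 1; omega
    simp only [Nat.testBit_zero]
    rw [h2] at hr ⊢
    generalize (2:Nat)^(N-1) = P at *
    rcases Nat.mod_two_eq_zero_or_one r with h | h <;> simp_all <;> omega
  | succ j ih =>
    intro N r hr hj
    have h2 : (2:Nat)^N = 2 * 2^(N-1) := by
      rw [← pow_succ']; congr 1; omega
    rw [Nat.testBit_succ, Nat.testBit_succ, h2]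
    have hdiv : (2 * 2^(N-1) - 1 - r) / 2 = 2^(N-1) - 1 - r/2 := by
      rw [h2] at hr
      generalize (2:Nat)^(N-1) = P at *
      omega
    rw [hdiv]
    exact ih (N-1) (r/2) (by rw [h2] at hr; omega) (by omega)

theorem pv_band_mask (a : Int) (N : Nat) :
    (PySem.Int.band a ((1 <<< (N : Int)) - 1)).toNat =
      if 0 ≤ a then a.toNat % 2^N else 2^N - 1 - ((-a - 1).toNat % 2^N) := by
  rw [Int.one_shiftLeft]
  have h1 : 1 ≤ (2:Nat)^N := Nat.one_le_two_pow
  have hmask : ((2^N : Nat) : Int) - 1 = ((2^N - 1 : Nat) : Int) := by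
    push_cast [h1]; ring
  rw [hmask]
  by_cases ha : 0 ≤ a
  · rw [if_pos ha, PySem.Int.band_of_nonneg ha (by positivity), Int.toNat_natCast,
        Int.toNat_natCast, Nat.and_two_pow_sub_one_eq_mod]
  · rw [if_neg ha]
    have hb : (0:Int) ≤ ((2^N - 1 : Nat) : Int) := by positivity
    unfold PySem.Int.band
    rw [if_neg ha, if_pos hb, Int.toNat_natCast, Int.toNat_natCast, Nat.and_comm,
        Nat.and_two_pow_sub_one_eq_mod]

theorem pv_band_mask_lt (a : Int) (N : Nat) :
    (PySem.Int.band a ((1 <<< (N : Int)) - 1)).toNat < 2^N := by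
  rw [pv_band_mask]
  have h1 : a.toNat % 2^N < 2^N := Nat.mod_lt _ (by positivity)
  have h2 : (0:Nat) < 2^N := by positivity
  split <;> omega

theorem pv_bit_bridge (a : Int) (N j : Nat) (hj : j < N) :
    ((PySem.Int.band a ((1 <<< (N : Int)) - 1)).toNat.testBit j) =
      decide (PySem.Int.band a ((1 : Int) <<< (j : Int)) ≠ 0) := by
  rw [pv_band_mask, Int.one_shiftLeft]
  have hp : (0:Nat) < 2^j := by positivity
  have hpj : (0:Int) ≤ ((2^j : Nat) : Int) := by positivity
  by_cases ha : 0 ≤ a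
  · rw [if_pos ha, PySem.Int.band_of_nonneg ha hpj, Int.toNat_natCast, Nat.and_two_pow,
        Nat.testBit_mod_two_pow]
    rcases Bool.eq_false_or_eq_true (a.toNat.testBit j) with h | h <;>
      simp [h, hj]
  · rw [if_neg ha]
    have hN : (0:Nat) < 2^N := by positivity
    rw [pv_testBit_compl j N ((-a - 1).toNat % 2^N) (Nat.mod_lt _ hN) hj,
        Nat.testBit_mod_two_pow]
    unfold PySem.Int.band
    rw [if_neg ha, if_pos hpj, Int.toNat_natCast, Nat.and_comm, Nat.and_two_pow]
    rcases Bool.eq_false_or_eq_true ((-a - 1).toNat.testBit j) with h | h <;>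
      simp [hj, Nat.sub_eq_zero_iff_le]

-- modify on a range-map is a pointwise update
theorem pv_modify_map_range (N k : Nat) (g : Nat → List Int) (f : List Int → List Int) :
    ((List.range N).map g).modify k f =
      (List.range N).map (fun j => if j = k then f (g j) else g j) := by
  apply List.ext_getElem
  · simp
  · intro i h1 h2
    simp only [List.getElem_modify, List.getElem_map, List.getElem_range]
    by_cases h : k = i
    · simp [h]
    · rw [if_neg h, if_neg (fun hh => h hh.symm)]

-- pvBitLoop characterised on a range-map accumulator
theorem pv_bitLoop_spec : ∀ (v j0 : Nat) (p : Int) (N : Nat) (g : Nat → List Int),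
    v < 2^(N - j0) →
    pvBitLoop p v j0 ((List.range N).map g) =
      (List.range N).map (fun j => if j0 ≤ j ∧ v.testBit (j - j0) then g j ++ [p] else g j) := by
  intro v
  induction v using Nat.strong_induction_on with
  | _ v ih =>
    intro j0 p N g hv
    by_cases h0 : v = 0
    · subst h0
      rw [pvBitLoop]
      simp
    · have hj0 : j0 < N := by
        by_contra hc
        have : N - j0 = 0 := by omega
        rw [this] at hv
        omega
      have hhalf : v >>> 1 < 2^(N - (j0 + 1)) := by
        rw [Nat.shiftRight_one]
        have : (2:Nat)^(N - j0) = 2 * 2^(N - (j0+1)) := by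
          rw [← pow_succ']
          congr 1
          omega
        omega
      rw [pvBitLoop, if_neg h0]
      have step :
          (if v &&& 1 = 1 then ((List.range N).map g).modify j0 (fun l => l ++ [p])
           else (List.range N).map g) =
          (List.range N).map (fun j => if j = j0 ∧ v.testBit 0 then g j ++ [p] else g j) := by
        rw [Nat.and_one_is_mod]
        rcases Nat.mod_two_eq_zero_or_one v with h | h
        · rw [h]
          simp only [Nat.testBit_zero, h]
          norm_num
        · rw [h, if_pos rfl, pv_modify_map_range]
          apply List.map_congr_left
          intro j _
          simp [Nat.testBit_zero, h]
      rw [step]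
      rw [ih (v >>> 1) (by rw [Nat.shiftRight_one]; omega) (j0+1) p N _ hhalf]
      apply List.map_congr_left
      intro j hj
      by_cases hle : j0 + 1 ≤ j
      · have hne : ¬ j = j0 := by omega
        have : v.testBit (j - j0) = (v >>> 1).testBit (j - (j0 + 1)) := by
          rw [Nat.shiftRight_one, ← Nat.testBit_succ]
          congr 1
          omega
        simp only [hne, false_and, if_false, hle, true_and]
        rw [this]
        simp [show j0 ≤ j by omega]
      · by_cases hj0' : j = j0
        · subst hj0'
          simp [hle]
        · have : ¬ j0 ≤ j := by omega
          simp [hle, hj0', this]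

-- B's person fold characterised: each person appends itself to every interview list
-- whose bit is set in its masked atom number
theorem pv_fold_spec (mask : Int) (N : Nat)
    (hmask : ∀ a : Int, (PySem.Int.band a mask).toNat < 2^N) :
    ∀ (ps : List (Int × Int)) (g : Nat → List Int),
    ps.foldl (fun res pa => pvBitLoop pa.1 (PySem.Int.band pa.2 mask).toNat 0 res)
        ((List.range N).map g) =
      (List.range N).map (fun j => g j ++
        (ps.filter (fun pa => (PySem.Int.band pa.2 mask).toNat.testBit j)).map Prod.fst) := by
  intro ps
  induction ps with
  | nil => intro g; simp
  | cons pa ps ihp =>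
    intro g
    simp only [List.foldl_cons]
    rw [pv_bitLoop_spec _ 0 pa.1 N g (by simpa using hmask pa.2), ihp]
    apply List.map_congr_left
    intro j _
    simp only [List.filter_cons]
    by_cases hb : (PySem.Int.band pa.2 mask).toNat.testBit j
    · simp [hb, List.append_assoc]
    · simp [hb]

-- A characterised as a map over the interview indices
theorem pv_A_spec (atom_numbers : List Int) (N : Nat) :
    atom_selection_to_interview atom_numbers (N : Int) =
      (List.range N).map (fun j =>
        ((PySem.List.enumerate atom_numbers).filter
          (fun pa => decide (PySem.Int.band pa.2 ((1 : Int) <<< ((j : Nat) : Int)) ≠ 0))).map Prod.fst) := by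
  unfold atom_selection_to_interview
  rw [PySem.List.pyRange_zero_natCast, List.foldl_map,
      PySem.List.foldl_append_singleton_eq_map
        (f := fun (k : Nat) => (PySem.List.enumerate atom_numbers).foldl
          (fun current_interview pa =>
            if PySem.Int.band pa.2 ((1 : Int) <<< ((k : Nat) : Int)) ≠ 0 then
              current_interview ++ [pa.1]
            else current_interview) [])]
  simp only [List.nil_append]
  apply List.map_congr_left
  intro j _
  have hfi := PySem.List.foldl_append_if
      (p := fun pa : Int × Int => decide (PySem.Int.band pa.2 ((1 : Int) <<< ((j : Nat) : Int)) ≠ 0))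
      (f := fun pa : Int × Int => pa.1) (PySem.List.enumerate atom_numbers) []
  simp only [decide_eq_true_eq, List.nil_append] at hfi
  rw [hfi]

-- B characterised as the same map over the interview indices
theorem pv_B_spec (atom_numbers : List Int) (m : Int) :
    atom_selection_to_interview_alt atom_numbers m =
      (List.range (max m 0).toNat).map (fun j =>
        ((PySem.List.enumerate atom_numbers).filter
          (fun pa => (PySem.Int.band pa.2 ((1 <<< (((max m 0).toNat : Nat) : Int)) - 1)).toNat.testBit j)).map Prod.fst) := by
  simp only [atom_selection_to_interview_alt]
  rw [show (max m 0) = (((max m 0).toNat : Nat) : Int) from (Int.toNat_of_nonneg (le_max_right _ _)).symm]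
  rw [Int.toNat_natCast]
  exact pv_fold_spec _ _ (fun a => pv_band_mask_lt a _) _ _

-- ===== VERDICT (by name: the statement is the Claim_ definition above) =====
theorem atom_selection_to_interview_spec : Claim_equal_atom_selection_to_interview := by
  intro atom_numbers number_of_interviews _
  unfold Spec_atom_selection_to_interview
  rw [pv_B_spec]
  by_cases h : 0 ≤ number_of_interviews
  · have hmax : max number_of_interviews 0 = number_of_interviews := max_eq_left h
    have hcast : number_of_interviews = ((number_of_interviews.toNat : Nat) : Int) :=
      (Int.toNat_of_nonneg h).symm
    rw [hmax]
    conv_lhs => rw [hcast]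
    rw [pv_A_spec]
    apply List.map_congr_left
    intro j hj
    simp only [List.mem_range] at hj
    congr 1
    apply List.filter_congr
    intro pa _
    rw [pv_bit_bridge pa.2 number_of_interviews.toNat j hj]
  · have h0 : (max number_of_interviews 0).toNat = 0 := by omega
    rw [h0]
    have hA : atom_selection_to_interview atom_numbers number_of_interviews = [] := by
      unfold atom_selection_to_interview
      have : PySem.List.pyRange 0 number_of_interviews = [] := by
        simp [PySem.List.pyRange]
        omega
      rw [this]
      rfl
    rw [hA]
    simp
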